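-- pv_equiv track=rewrite | github.com/cirosantilli/project-euler-solvers | solvers/132.py | solve
-- ===== SOURCE A (Python) =====
-- def powmod(base: int, exponent: int, modulo: int) -> int:
--     return pow(base, exponent, modulo)
--
-- def solve(digits: int, num_factors: int) -> int:
--     total = 0
--     primes = [2]
--     i = 3
--     while num_factors > 0:
--         is_prime = True
--         for p in primes:
--             if p * p > i:
--                 break
--             if i % p == 0:
--                 is_prime = False
--                 break
--         if is_prime:
--             primes.append(i)
--             modulo = 9 * i
--             if powmod(10, digits, modulo) == 1:
--                 total += i
--                 num_factors -= 1
--             if i > 1111111: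
--                 break
--         i += 2
--
--     return total
-- ===== SOURCE B (Python) =====
-- def solve(digits: int, num_factors: int) -> int:
--     def is_prime(n: int) -> bool:
--         d = 3
--         while d * d <= n:
--             if n % d == 0:
--                 return False
--             d += 2
--         return True
--
--     total = 0
--     count = 0
--     i = 3
--     while count < num_factors:
--         if is_prime(i):
--             if pow(10, digits, 9 * i) == 1:
--                 total += i
--                 count += 1
--             if i > 1111111:
--                 break
--         i += 2
--     return total
-- ===== Notes on version B (the rewrite author's own statement) =====
-- stated objective: simpler
-- what changed: B drops A's growing primes list entirely: each candidate is tested by direct trial division by the odd numbers up to its square root, and the budget is counted upward instead of mutating num_factors downward.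
-- outside the precondition, e.g. on solve(-3, 1): A returns 3, B returns 3; on solve(-1, 1): A raises ValueError, B raises ValueError
import Mathlib
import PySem

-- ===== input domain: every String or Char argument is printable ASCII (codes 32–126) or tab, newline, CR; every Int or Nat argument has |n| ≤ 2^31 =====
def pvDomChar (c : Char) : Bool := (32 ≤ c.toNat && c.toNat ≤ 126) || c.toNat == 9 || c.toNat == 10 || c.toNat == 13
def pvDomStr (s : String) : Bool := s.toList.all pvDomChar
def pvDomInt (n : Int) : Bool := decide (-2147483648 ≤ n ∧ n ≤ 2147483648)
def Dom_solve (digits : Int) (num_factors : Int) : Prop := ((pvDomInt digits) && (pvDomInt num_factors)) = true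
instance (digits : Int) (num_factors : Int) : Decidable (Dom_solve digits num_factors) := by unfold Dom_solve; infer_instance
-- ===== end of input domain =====

-- B replaces A's growing primes list (trial division by stored primes) with direct trial
-- division of each candidate by the odd numbers up to its square root, counting hits upward;
-- objective: simpler (no list state), same answers.

-- Shared model of Python's built-in three-argument pow, called identically by both Pythons.
-- Binary exponentiation; exact for nonnegative exponent and positive modulus, which is the
-- only way either program reaches it under Pre_solve (exponent = digits ≥ 0, modulus = 9*i > 0).
def powmodNat (b e m : Nat) : Nat :=
  if e = 0 then 1 % m
  else
    let h := powmodNat b (e / 2) m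
    if e % 2 = 0 then h * h % m else h * h % m * (b % m) % m
termination_by e
decreasing_by exact Nat.div_lt_self (Nat.pos_of_ne_zero (by assumption)) (by omega)

def powmod (base : Int) (exponent : Int) (modulo : Int) : Int :=
  ((powmodNat base.toNat exponent.toNat modulo.toNat : Nat) : Int)

-- ===== PORT A =====
-- Python's 'for p in primes: …break' over the list, as index recursion over the array.
def trialA (primes : Array Int) (i : Int) (k : Nat) : Bool :=
  if h : k < primes.size then
    let p := primes[k]
    if p * p > i then true
    else if PySem.Int.mod i p == 0 then false
    else trialA primes i (k + 1)
  else true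
termination_by primes.size - k

-- A's while-loop; fuel 600000 exceeds the iteration count on every input (i steps by 2 from 3
-- and the loop always breaks by the first prime above 1111111, which is below 1203111).
def solveLoopA (digits : Int) (fuel : Nat) (total : Int) (primes : Array Int) (i : Int) (nf : Int) : Int :=
  match fuel with
  | 0 => total
  | fuel + 1 =>
    if 0 < nf then
      if trialA primes i 0 then
        let primes' := primes.push i
        let m := 9 * i
        let s := if powmod 10 digits m == 1 then (total + i, nf - 1) else (total, nf)
        if i > 1111111 then s.1
        else solveLoopA digits fuel s.1 primes' (i + 2) s.2
      else solveLoopA digits fuel total primes (i + 2) nf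
    else total

def solve (digits : Int) (num_factors : Int) : Int :=
  solveLoopA digits 600000 0 #[2] 3 num_factors

-- ===== PORT B =====
-- B's helper is_prime: trial division by d = 3, 5, 7, … while d*d ≤ n.
def isPrimeAux (n : Int) (d : Int) : Bool :=
  if d * d ≤ n then
    if PySem.Int.mod n d == 0 then false else isPrimeAux n (d + 2)
  else true
termination_by (n + 1 - d).toNat
decreasing_by
  rename_i h _
  have h2 : 2 * d - 1 ≤ n := by nlinarith [mul_self_nonneg (d - 1)]
  have h3 : 0 ≤ d * d := mul_self_nonneg d
  omega

def solveLoopB (digits : Int) (fuel : Nat) (total : Int) (count : Int) (num_factors : Int) (i : Int) : Int :=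
  match fuel with
  | 0 => total
  | fuel + 1 =>
    if count < num_factors then
      if isPrimeAux i 3 then
        let s := if powmod 10 digits (9 * i) == 1 then (total + i, count + 1) else (total, count)
        if i > 1111111 then s.1
        else solveLoopB digits fuel s.1 s.2 num_factors (i + 2)
      else solveLoopB digits fuel total count num_factors (i + 2)
    else total

def solve_alt (digits : Int) (num_factors : Int) : Int :=
  solveLoopB digits 600000 0 0 num_factors 3

-- ===== PRECONDITION & SPEC =====
-- Pre_ excludes negative digits with positive num_factors: there Python's pow(10, digits, 9*i)
-- computes a modular inverse and raises ValueError at the first tested prime whose modulus is not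
-- coprime to 10 on almost all such inputs (B behaves identically); the rare returning corner
-- (digits a negative multiple of 3 with num_factors == 1, where A and B both return 3) is
-- excluded with it because the ports model pow only for nonnegative exponents.
def Pre_solve (digits : Int) (num_factors : Int) : Prop := 0 ≤ digits ∨ num_factors ≤ 0
instance (digits : Int) (num_factors : Int) : Decidable (Pre_solve digits num_factors) := by
  unfold Pre_solve; infer_instance

def pvWitness_solve : Int × Int := (2, 1)

def Spec_solve (digits : Int) (num_factors : Int) (out : Int) : Prop := out = solve_alt digits num_factors
instance (digits : Int) (num_factors : Int) (out : Int) : Decidable (Spec_solve digits num_factors out) := by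
  unfold Spec_solve; infer_instance

-- ===== CLAIM (what is proved, stated in full; the proofs are below) =====
def Claim_equal_solve : Prop := ∀ (digits : Int) (num_factors : Int), Dom_solve digits num_factors → Pre_solve digits num_factors → Spec_solve digits num_factors (solve digits num_factors)

-- ===== LEMMAS AND PROOFS =====

-- the primes A has stored when the loop reaches candidate i (beyond the seed 2)
def primesBelow (n : Nat) : List Int :=
  List.map (fun m : Nat => (m : Int)) ((List.range n).filter (fun m => decide (3 ≤ m) && decide (Nat.Prime m)))

def trialAList : List Int → Int → Bool
  | [], _ => true
  | p :: ps, i => if p * p > i then true else if PySem.Int.mod i p == 0 then false else trialAList ps i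

theorem trialA_eq_list (primes : Array Int) (i : Int) (k : Nat) :
    trialA primes i k = trialAList (primes.toList.drop k) i := by
  fun_induction trialA primes i k with
  | case1 k h p h1 =>
      rw [List.drop_eq_getElem_cons (by simpa using h)]
      simp [trialAList, p, h1]
  | case2 k h p h1 h2 =>
      rw [List.drop_eq_getElem_cons (by simpa using h)]
      simp [trialAList, p, h1, h2]
  | case3 k h p h1 h2 ih =>
      rw [List.drop_eq_getElem_cons (by simpa using h)]
      simp [trialAList, p, h1, h2, ih]
  | case4 k h =>
      rw [List.drop_of_length_le (by simpa using Nat.le_of_not_lt h)]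
      simp [trialAList]

theorem trialAList_iff (l : List Int) (i : Int) (hpos : ∀ p ∈ l, 1 ≤ p)
    (hsort : l.Pairwise (· ≤ ·)) :
    trialAList l i = true ↔ ∀ p ∈ l, p * p ≤ i → ¬ PySem.Int.mod i p = 0 := by
  induction l with
  | nil => simp [trialAList]
  | cons p ps ih =>
    rw [List.pairwise_cons] at hsort
    by_cases h1 : p * p > i
    · rw [show trialAList (p :: ps) i = true from by simp [trialAList, h1]]
      refine iff_of_true rfl ?_
      intro q hq hle
      rcases List.mem_cons.mp hq with hq | hq
      · subst hq; omega
      · exfalso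
        have hpq : p ≤ q := hsort.1 q hq
        have hp1 : 1 ≤ p := hpos p (by simp)
        nlinarith
    · by_cases h2 : PySem.Int.mod i p = 0
      · rw [show trialAList (p :: ps) i = false from by simp [trialAList, h1, h2]]
        refine iff_of_false (by simp) ?_
        intro hall
        exact hall p (by simp) (by omega) h2
      · rw [show trialAList (p :: ps) i = trialAList ps i from by simp [trialAList, h1, h2]]
        rw [ih (fun q hq => hpos q (by simp [hq])) hsort.2]
        constructor
        · intro hall q hq hle
          rcases List.mem_cons.mp hq with hq | hq
          · subst hq; exact h2
          · exact hall q hq hle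
        · intro hall q hq hle
          exact hall q (by simp [hq]) hle

theorem isPrimeAux_iff (n : Int) (d : Int) (hd : 0 ≤ d) :
    isPrimeAux n d = true ↔
      ∀ e : Int, (∃ k : Nat, e = d + 2 * k) → e * e ≤ n → ¬ PySem.Int.mod n e = 0 := by
  by_cases h1 : d * d ≤ n
  · by_cases h2 : PySem.Int.mod n d = 0
    · rw [show isPrimeAux n d = false from by rw [isPrimeAux]; simp [h1, h2]]
      refine iff_of_false (by simp) ?_
      intro hall
      exact hall d ⟨0, by omega⟩ h1 h2
    · rw [show isPrimeAux n d = isPrimeAux n (d + 2) from by rw [isPrimeAux]; simp [h1, h2]]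
      rw [isPrimeAux_iff n (d + 2) (by omega)]
      constructor
      · intro hall e he hle
        obtain ⟨k, hk⟩ := he
        match k with
        | 0 => rw [show e = d from by omega]; exact h2
        | k + 1 => exact hall e ⟨k, by push_cast at hk ⊢; omega⟩ hle
      · intro hall e he hle
        obtain ⟨k, hk⟩ := he
        exact hall e ⟨k + 1, by push_cast at hk ⊢; omega⟩ hle
  · rw [show isPrimeAux n d = true from by rw [isPrimeAux]; simp [h1]]
    refine iff_of_true rfl ?_
    intro e he hle
    exfalso
    obtain ⟨k, hk⟩ := he
    have he2 : d ≤ e := by have : (0:Int) ≤ (k:Int) := Int.natCast_nonneg k; omega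
    nlinarith
termination_by (n + 1 - d).toNat
decreasing_by
  have h3 : 0 ≤ d * d := mul_self_nonneg d
  have h2 : 2 * d - 1 ≤ n := by nlinarith [mul_self_nonneg (d - 1)]
  omega

theorem mem_primesBelow {p : Int} {n : Nat} :
    p ∈ primesBelow n ↔ ∃ m : Nat, m < n ∧ 3 ≤ m ∧ m.Prime ∧ p = (m : Int) := by
  simp [primesBelow, List.mem_filter, List.mem_range]
  constructor
  · rintro ⟨m, ⟨hm, h3, hp⟩, rfl⟩; exact ⟨m, hm, h3, hp, rfl⟩
  · rintro ⟨m, hm, h3, hp, rfl⟩; exact ⟨m, ⟨hm, h3, hp⟩, rfl⟩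

theorem primesBelow_sorted (n : Nat) : (primesBelow n).Pairwise (· ≤ ·) := by
  unfold primesBelow
  rw [List.pairwise_map]
  refine List.Pairwise.imp ?_ ((List.pairwise_lt_range).filter _)
  intro a b hab
  exact_mod_cast hab.le

theorem primesBelow_step (n : Nat) (h3 : 3 ≤ n) (hodd : n % 2 = 1) :
    primesBelow (n + 2) = primesBelow n ++ (if Nat.Prime n then [(n : Int)] else []) := by
  have hnp1 : ¬ (n + 1).Prime := by
    intro hp
    rcases hp.eq_one_or_self_of_dvd 2 (by omega) with h | h <;> omega
  by_cases hp : Nat.Prime n <;>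
    simp [primesBelow, show n + 2 = n + 1 + 1 from rfl, List.range_succ, List.filter_append, hp, hnp1, h3]

theorem testA_iff_prime (primes : Array Int) (i : Int) (hi : 3 ≤ i) (hodd : i % 2 = 1)
    (hinv : primes.toList = 2 :: primesBelow i.toNat) :
    trialA primes i 0 = true ↔ Nat.Prime i.toNat := by
  have hin : ((i.toNat : Int)) = i := Int.toNat_of_nonneg (by omega)
  have hpos : ∀ p ∈ (2 : Int) :: primesBelow i.toNat, 1 ≤ p := by
    intro p hp
    rcases List.mem_cons.mp hp with rfl | hpm
    · norm_num
    · obtain ⟨m, _, hm3, _, rfl⟩ := mem_primesBelow.mp hpm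
      exact_mod_cast by omega
  have hsort : ((2 : Int) :: primesBelow i.toNat).Pairwise (· ≤ ·) := by
    rw [List.pairwise_cons]
    refine ⟨?_, primesBelow_sorted _⟩
    intro q hq
    obtain ⟨m, _, hm3, _, rfl⟩ := mem_primesBelow.mp hq
    exact_mod_cast by omega
  rw [trialA_eq_list, List.drop_zero, hinv, trialAList_iff _ _ hpos hsort]
  constructor
  · intro hall
    by_contra hnp
    have hq : (i.toNat.minFac).Prime := Nat.minFac_prime (by omega)
    have hdvd : i.toNat.minFac ∣ i.toNat := Nat.minFac_dvd _
    have hsq : i.toNat.minFac * i.toNat.minFac ≤ i.toNat := by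
      have h := Nat.minFac_sq_le_self (n := i.toNat) (by omega) hnp
      rw [pow_two] at h
      exact h
    have hq2 : i.toNat.minFac ≠ 2 := by
      intro h2
      rw [h2] at hdvd
      omega
    have hq3 : 3 ≤ i.toNat.minFac := by
      have := hq.two_le
      omega
    have hqlt : i.toNat.minFac < i.toNat := by nlinarith
    have hmem : ((i.toNat.minFac : Int)) ∈ (2 : Int) :: primesBelow i.toNat :=
      List.mem_cons_of_mem _ (mem_primesBelow.mpr ⟨_, hqlt, hq3, hq, rfl⟩)
    refine hall _ hmem ?_ ?_
    · calc ((i.toNat.minFac : Int)) * ((i.toNat.minFac : Int))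
          = ((i.toNat.minFac * i.toNat.minFac : Nat) : Int) := by push_cast; ring
        _ ≤ ((i.toNat : Int)) := by exact_mod_cast hsq
        _ = i := hin
    · rw [PySem.Int.mod_eq_zero_iff_dvd, ← hin]
      exact_mod_cast hdvd
  · intro hp p hpmem hple
    rcases List.mem_cons.mp hpmem with rfl | hpm
    · rw [PySem.Int.mod_eq_zero_iff_dvd]
      omega
    · obtain ⟨m, hmlt, hm3, hmp, rfl⟩ := mem_primesBelow.mp hpm
      rw [PySem.Int.mod_eq_zero_iff_dvd, ← hin]
      intro hdvd
      have hmn : m ∣ i.toNat := by exact_mod_cast hdvd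
      rcases hp.eq_one_or_self_of_dvd m hmn with h | h <;> omega

theorem testB_iff_prime (i : Int) (hi : 3 ≤ i) (hodd : i % 2 = 1) :
    isPrimeAux i 3 = true ↔ Nat.Prime i.toNat := by
  have hin : ((i.toNat : Int)) = i := Int.toNat_of_nonneg (by omega)
  rw [isPrimeAux_iff i 3 (by norm_num)]
  constructor
  · intro hall
    by_contra hnp
    have hq : (i.toNat.minFac).Prime := Nat.minFac_prime (by omega)
    have hdvd : i.toNat.minFac ∣ i.toNat := Nat.minFac_dvd _
    have hsq : i.toNat.minFac * i.toNat.minFac ≤ i.toNat := by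
      have h := Nat.minFac_sq_le_self (n := i.toNat) (by omega) hnp
      rw [pow_two] at h
      exact h
    have hq2 : i.toNat.minFac ≠ 2 := by
      intro h2
      rw [h2] at hdvd
      omega
    have hq3 : 3 ≤ i.toNat.minFac := by
      have := hq.two_le
      omega
    refine hall ((i.toNat.minFac : Int)) ⟨(i.toNat.minFac - 3) / 2, ?_⟩ ?_ ?_
    · have hqodd : i.toNat.minFac % 2 = 1 := by
        rcases Nat.mod_two_eq_zero_or_one i.toNat.minFac with h | h
        · exfalso
          have h2 : (2 : Nat) ∣ i.toNat.minFac := by omega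
          have := h2.trans hdvd
          omega
        · exact h
      omega
    · calc ((i.toNat.minFac : Int)) * ((i.toNat.minFac : Int))
          = ((i.toNat.minFac * i.toNat.minFac : Nat) : Int) := by push_cast; ring
        _ ≤ ((i.toNat : Int)) := by exact_mod_cast hsq
        _ = i := hin
    · rw [PySem.Int.mod_eq_zero_iff_dvd, ← hin]
      exact_mod_cast hdvd
  · intro hp e he hle
    obtain ⟨k, hk⟩ := he
    rw [PySem.Int.mod_eq_zero_iff_dvd]
    intro hdvd
    have he3 : 3 ≤ e := by
      have : (0:Int) ≤ (k:Int) := Int.natCast_nonneg k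
      omega
    have hei : e < i := by nlinarith
    have hdn : e.toNat ∣ i.toNat := by
      have h1 : ((e.toNat : Int)) = e := Int.toNat_of_nonneg (by omega)
      rw [← hin, ← h1] at hdvd
      exact_mod_cast hdvd
    rcases hp.eq_one_or_self_of_dvd _ hdn with h | h <;> omega

theorem loops_eq (fuel : Nat) (digits : Int) (nf : Int) (total : Int) (primes : Array Int) (i : Int)
    (count : Int) (hi : 3 ≤ i) (hodd : i % 2 = 1)
    (hinv : primes.toList = 2 :: primesBelow i.toNat) :
    solveLoopA digits fuel total primes i (nf - count) = solveLoopB digits fuel total count nf i := by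
  induction fuel generalizing total primes i count with
  | zero => rfl
  | succ fuel ih =>
    have hin : ((i.toNat : Int)) = i := Int.toNat_of_nonneg (by omega)
    rw [solveLoopA, solveLoopB]
    by_cases hc : count < nf
    · rw [if_pos (by omega : (0:Int) < nf - count), if_pos hc]
      have h1 := testA_iff_prime primes i hi hodd hinv
      have h2 := testB_iff_prime i hi hodd
      by_cases hp : Nat.Prime i.toNat
      · rw [if_pos (h1.mpr hp), if_pos (h2.mpr hp)]
        have hpush : (primes.push i).toList = 2 :: primesBelow (i + 2).toNat := by
          rw [Array.toList_push, hinv]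
          rw [show (i + 2).toNat = i.toNat + 2 from by omega,
              primesBelow_step i.toNat (by omega) (by omega), if_pos hp]
          simp [hin]
        by_cases hpw : (powmod 10 digits (9 * i) == 1) = true
        · simp only [if_pos hpw]
          by_cases hcap : i > 1111111
          · rw [if_pos hcap, if_pos hcap]
          · rw [if_neg hcap, if_neg hcap]
            have := ih (total + i) (primes.push i) (i + 2) (count + 1)
              (by omega) (by omega) hpush
            simpa [show nf - count - 1 = nf - (count + 1) from by ring] using this
        · simp only [if_neg hpw]
          by_cases hcap : i > 1111111
          · rw [if_pos hcap, if_pos hcap]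
          · rw [if_neg hcap, if_neg hcap]
            exact ih total (primes.push i) (i + 2) count (by omega) (by omega) hpush
      · rw [if_neg (fun h => hp (h1.mp h)), if_neg (fun h => hp (h2.mp h))]
        have hkeep : primes.toList = 2 :: primesBelow (i + 2).toNat := by
          rw [show (i + 2).toNat = i.toNat + 2 from by omega,
              primesBelow_step i.toNat (by omega) (by omega), if_neg hp]
          simpa using hinv
        exact ih total primes (i + 2) count (by omega) (by omega) hkeep
    · rw [if_neg (by omega : ¬ (0:Int) < nf - count), if_neg hc]

-- ===== VERDICT (by name: the statement is the Claim_ definition above) =====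
theorem solve_spec : Claim_equal_solve := by
  intro digits num_factors _ _
  unfold Spec_solve solve solve_alt
  have h := loops_eq 600000 digits num_factors 0 #[2] 3 0 (by norm_num) (by norm_num)
    (by norm_num [primesBelow]; decide)
  simpa using h
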